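-- pv_equiv track=rewrite | github.com/jtiisto/wellness | mcp_servers/coach_mcp/server.py | _needs_transform
-- ===== SOURCE A (Python) =====
-- def _needs_transform(plan):
--     """Check if block plan has raw LLM exercises that need transformation."""
--     for block in plan.get("blocks", []):
--         for ex in block.get("exercises", []):
--             if "id" not in ex or "type" not in ex:
--                 return True
--     # Cardio blocks with instructions (no exercises) also need transform
--     for block in plan.get("blocks", []):
--         if "instructions" in block and "exercises" not in block:
--             return True
--     return False
-- ===== SOURCE B (Python) =====
-- def _needs_transform(plan):
--     """Recursive descent over the blocks list; a block is flagged if some of its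
--     exercises lacks the required key set {"id", "type"} (set-inclusion test) or
--     it is a cardio block (instructions present, exercises absent)."""
--     REQUIRED = {"id", "type"}
--
--     def flagged(block):
--         if any(not (REQUIRED <= ex.keys()) for ex in block.get("exercises", [])):
--             return True
--         return "instructions" in block and "exercises" not in block
--
--     def go(blocks):
--         if not blocks:
--             return False
--         return flagged(blocks[0]) or go(blocks[1:])
--
--     return go(plan.get("blocks", []))
-- ===== Notes on version B (the rewrite author's own statement) =====
-- stated objective: alternative
-- what changed: B replaces A's two sequential imperative scans with a single recursive descent over the blocks list, testing each block once with a required-key-set inclusion check ({'id','type'} <= ex.keys()) instead of A's per-key 'not in' tests.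
import Mathlib
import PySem

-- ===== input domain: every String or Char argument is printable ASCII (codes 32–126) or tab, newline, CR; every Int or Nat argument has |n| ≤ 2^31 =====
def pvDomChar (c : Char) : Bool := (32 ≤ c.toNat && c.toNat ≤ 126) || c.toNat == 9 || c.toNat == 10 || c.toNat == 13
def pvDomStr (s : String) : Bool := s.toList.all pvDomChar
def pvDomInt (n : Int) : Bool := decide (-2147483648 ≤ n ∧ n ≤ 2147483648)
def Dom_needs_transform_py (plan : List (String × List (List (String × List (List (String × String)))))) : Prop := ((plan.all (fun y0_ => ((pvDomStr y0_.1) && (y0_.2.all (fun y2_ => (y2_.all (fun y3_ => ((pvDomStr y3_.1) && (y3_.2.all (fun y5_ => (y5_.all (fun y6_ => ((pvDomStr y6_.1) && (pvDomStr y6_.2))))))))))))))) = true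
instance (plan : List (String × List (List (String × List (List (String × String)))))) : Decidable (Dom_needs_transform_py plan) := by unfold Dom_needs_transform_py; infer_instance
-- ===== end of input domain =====

-- B replaces A's two sequential imperative scans with one recursive descent over the
-- blocks list, using a required-key-set inclusion test per exercise (objective: alternative).

-- ===== PORT A =====
-- A: first loop over blocks scanning exercises for a missing "id"/"type" key,
-- then a second loop over blocks for the cardio condition.
def needs_transform_py (plan : List (String × List (List (String × List (List (String × String)))))) : Bool :=
  let blocks := (PySem.Dict.mk plan).getD "blocks" []
  if blocks.any (fun block =>
      ((PySem.Dict.mk block).getD "exercises" []).any (fun ex =>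
        !(PySem.Dict.mk ex).contains "id" || !(PySem.Dict.mk ex).contains "type"))
  then true
  else if blocks.any (fun block =>
      (PySem.Dict.mk block).contains "instructions" && !(PySem.Dict.mk block).contains "exercises")
  then true
  else false

-- ===== PORT B =====
-- B's flagged(block): some exercise misses the required key set {"id","type"},
-- or the block is a cardio block.
def ntFlagged (block : List (String × List (List (String × String)))) : Bool :=
  if ((PySem.Dict.mk block).getD "exercises" []).any (fun ex =>
      !(["id", "type"].all (fun k => (PySem.Dict.mk ex).contains k)))
  then true
  else (PySem.Dict.mk block).contains "instructions" && !(PySem.Dict.mk block).contains "exercises"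

-- B's go(blocks): recursion on the list, short-circuit ∨ of flagged.
def ntGo : List (List (String × List (List (String × String)))) → Bool
  | [] => false
  | block :: rest => ntFlagged block || ntGo rest

def needs_transform_py_alt (plan : List (String × List (List (String × List (List (String × String)))))) : Bool :=
  ntGo ((PySem.Dict.mk plan).getD "blocks" [])

-- ===== PRECONDITION & SPEC =====
def Spec_needs_transform_py (plan : List (String × List (List (String × List (List (String × String)))))) (out : Bool) : Prop := out = needs_transform_py_alt plan
instance (plan : List (String × List (List (String × List (List (String × String)))))) (out : Bool) : Decidable (Spec_needs_transform_py plan out) := by unfold Spec_needs_transform_py; infer_instance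

-- ===== CLAIM (what is proved, stated in full; the proofs are below) =====
def Claim_equal_needs_transform_py : Prop := ∀ (plan : List (String × List (List (String × List (List (String × String)))))), Dom_needs_transform_py plan → Spec_needs_transform_py plan (needs_transform_py plan)

-- ===== LEMMAS AND PROOFS =====

-- B's subset test on an exercise equals A's disjunction of per-key misses.
lemma ntFlagged_ex_pred (ex : List (String × String)) :
    (!(["id", "type"].all (fun k => (PySem.Dict.mk ex).contains k))) =
    (!(PySem.Dict.mk ex).contains "id" || !(PySem.Dict.mk ex).contains "type") := by
  simp [List.all_cons]

-- B's recursion equals the disjunction of A's two scans.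
lemma ntGo_eq_any_or (blocks : List (List (String × List (List (String × String))))) :
    ntGo blocks =
      (blocks.any (fun block =>
        ((PySem.Dict.mk block).getD "exercises" []).any (fun ex =>
          !(PySem.Dict.mk ex).contains "id" || !(PySem.Dict.mk ex).contains "type")) ||
       blocks.any (fun block =>
        (PySem.Dict.mk block).contains "instructions" && !(PySem.Dict.mk block).contains "exercises")) := by
  induction blocks with
  | nil => simp [ntGo]
  | cons b rest ih =>
    rw [ntGo, ih]
    unfold ntFlagged
    rw [Bool.if_true_left]
    simp only [List.any_cons, ntFlagged_ex_pred, Bool.decide_eq_true]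
    simp only [Bool.or_assoc, Bool.or_comm, Bool.or_left_comm]

-- ===== VERDICT (by name: the statement is the Claim_ definition above) =====
theorem needs_transform_py_spec : Claim_equal_needs_transform_py := by
  intro plan _
  unfold Spec_needs_transform_py needs_transform_py needs_transform_py_alt
  rw [ntGo_eq_any_or]
  by_cases h : (((PySem.Dict.mk plan).getD "blocks" []).any (fun block =>
      ((PySem.Dict.mk block).getD "exercises" []).any (fun ex =>
        !(PySem.Dict.mk ex).contains "id" || !(PySem.Dict.mk ex).contains "type"))) = true
  · simp only [h, if_true, Bool.true_or]
  · rw [Bool.not_eq_true] at h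
    simp only [h, Bool.false_or]
    split <;> simp_all
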